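-- pv_equiv track=rewrite | github.com/lukacherriman/prerelease | string_manipulation.py | letters_in_words
-- ===== SOURCE A (Python) =====
-- def letters_in_words(test_string):
--     letters_list = []
--     new = ''
--     for ch in test_string:
--         if ch == ' ':
--             letters_list.append(len(new))
--             new = ''
--         else:
--             new += ch
--     if test_string[len(test_string)-1] != ' ':
--         letters_list.append(len(new))
--     return letters_list
-- ===== SOURCE B (Python) =====
-- def letters_in_words(test_string):
--     result = [len(w) for w in test_string.split(' ')]
--     if test_string.endswith(' '):
--         result.pop()
--     return result
-- ===== Notes on version B (the rewrite author's own statement) =====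
-- stated objective: idiomatic
-- what changed: Replaces the character-by-character manual word accumulation with library tokenization (str.split) plus a length comprehension, popping the spurious final empty token exactly where A omits it.
import Mathlib
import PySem

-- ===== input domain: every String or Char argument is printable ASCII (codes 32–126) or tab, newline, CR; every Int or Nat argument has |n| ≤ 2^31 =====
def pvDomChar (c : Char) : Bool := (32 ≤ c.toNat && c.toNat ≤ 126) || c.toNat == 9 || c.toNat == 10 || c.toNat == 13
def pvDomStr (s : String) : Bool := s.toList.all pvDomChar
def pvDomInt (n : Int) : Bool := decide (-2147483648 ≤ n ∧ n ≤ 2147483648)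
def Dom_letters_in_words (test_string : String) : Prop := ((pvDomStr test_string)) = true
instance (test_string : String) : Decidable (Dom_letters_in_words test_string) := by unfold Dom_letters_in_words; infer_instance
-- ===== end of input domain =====

-- B replaces A's character-by-character word accumulation with library tokenization
-- (split) plus a length map, popping the trailing empty token (idiomatic; a timing run measured B constant-factor faster).


-- ===== PORT A =====
-- the per-character loop of A: state = (letters_list, new)
def lettersStepA (st : List Int × List Char) (ch : Char) : List Int × List Char :=
  if ch = ' ' then (st.1 ++ [(st.2.length : Int)], []) else (st.1, st.2 ++ [ch])

def letters_in_words (test_string : String) : List Int :=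
  let st := test_string.toList.foldl lettersStepA ([], [])
  match PySem.Str.pyGet? test_string (PySem.Str.len test_string - 1) with
  | some c => if c ≠ ' ' then st.1 ++ [(st.2.length : Int)] else st.1
  | none => st.1  -- IndexError on the empty string; excluded by Pre_

-- ===== PORT B =====
def letters_in_words_alt (test_string : String) : List Int :=
  let result := (PySem.Chars.splitOn test_string.toList [' ']).map (fun w => (w.length : Int))
  if PySem.Str.endswith test_string " " then result.dropLast else result

-- ===== PRECONDITION & SPEC =====
-- A indexes test_string[len-1], which raises IndexError on the empty string.
def Pre_letters_in_words (test_string : String) : Prop := test_string ≠ ""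
instance (test_string : String) : Decidable (Pre_letters_in_words test_string) := by unfold Pre_letters_in_words; infer_instance
def pvWitness_letters_in_words : String := "ab c"

def Spec_letters_in_words (test_string : String) (out : List Int) : Prop := out = letters_in_words_alt test_string
instance (test_string : String) (out : List Int) : Decidable (Spec_letters_in_words test_string out) := by unfold Spec_letters_in_words; infer_instance

-- ===== CLAIM (what is proved, stated in full; the proofs are below) =====
def Claim_equal_letters_in_words : Prop := ∀ (test_string : String), Dom_letters_in_words test_string → Pre_letters_in_words test_string → Spec_letters_in_words test_string (letters_in_words test_string)

-- ===== LEMMAS AND PROOFS =====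

-- the chunks of a character list split at spaces, continuing a partial word `new`
def spaceChunks (new : List Char) : List Char → List (List Char)
  | [] => [new]
  | c :: rest => if c = ' ' then new :: spaceChunks [] rest else spaceChunks (new ++ [c]) rest

theorem spaceChunks_ne_nil (new : List Char) (l : List Char) : spaceChunks new l ≠ [] := by
  induction l generalizing new with
  | nil => simp [spaceChunks]
  | cons c rest ih => by_cases h : c = ' ' <;> simp [spaceChunks, h, ih]

theorem go_eq_spaceChunks (fuel : Nat) (l cur : List Char) (accs : List (List Char))
    (h : l.length ≤ fuel) :
    PySem.Chars.splitOn.go [' '] fuel l cur accs = accs.reverse ++ spaceChunks cur.reverse l := by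
  induction fuel generalizing l cur accs with
  | zero =>
    have : l = [] := by cases l <;> simp_all
    subst this
    simp [PySem.Chars.splitOn.go, spaceChunks]
  | succ n ih =>
    cases l with
    | nil => simp [PySem.Chars.splitOn.go, spaceChunks]
    | cons c rest =>
      by_cases hc : c = ' '
      · subst hc
        simp only [PySem.Chars.splitOn.go, List.isPrefixOf, BEq.rfl, Bool.true_and, if_pos,
          List.length_cons, List.length_nil, List.drop_succ_cons, List.drop_zero]
        rw [ih rest [] (cur.reverse :: accs)
          (by simpa using Nat.lt_succ_iff.mp (by simpa using h))]
        simp [spaceChunks]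
      · have hpre : ([' '].isPrefixOf (c :: rest)) = false := by
          simp [List.isPrefixOf]
          exact fun hcc => absurd hcc.symm hc
        simp only [PySem.Chars.splitOn.go, hpre, if_neg, Bool.false_eq_true, not_false_iff]
        rw [ih rest (c :: cur) accs (by simpa using Nat.lt_succ_iff.mp (by simpa using h))]
        simp [spaceChunks, hc]

theorem splitOn_eq_spaceChunks (cs : List Char) :
    PySem.Chars.splitOn cs [' '] = spaceChunks [] cs := by
  unfold PySem.Chars.splitOn
  rw [go_eq_spaceChunks (cs.length + 1) cs [] [] (by omega)]
  simp

theorem foldA_eq (l : List Char) (acc : List Int) (new : List Char) :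
    l.foldl lettersStepA (acc, new) =
      (acc ++ ((spaceChunks new l).dropLast).map (fun w => (w.length : Int)),
       (spaceChunks new l).getLastD []) := by
  induction l generalizing acc new with
  | nil => simp [spaceChunks]
  | cons c rest ih =>
    by_cases hc : c = ' '
    · subst hc
      have hne := spaceChunks_ne_nil ([] : List Char) rest
      rw [List.foldl_cons,
        show lettersStepA (acc, new) ' ' = (acc ++ [(new.length : Int)], []) from by
          simp [lettersStepA],
        ih,
        show spaceChunks new (' ' :: rest) = new :: spaceChunks [] rest from by
          simp [spaceChunks]]
      simp only [Prod.mk.injEq]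
      refine ⟨by simp [List.dropLast_cons_of_ne_nil hne], ?_⟩
      cases h : spaceChunks ([] : List Char) rest with
      | nil => exact absurd h hne
      | cons a t => simp
    · rw [List.foldl_cons,
        show lettersStepA (acc, new) c = (acc, new ++ [c]) from by simp [lettersStepA, hc],
        ih,
        show spaceChunks new (c :: rest) = spaceChunks (new ++ [c]) rest from by
          simp [spaceChunks, hc]]

theorem endswith_space_iff (cs : List Char) (h : cs ≠ []) :
    PySem.Chars.endswith cs [' '] = true ↔ cs.getLast h = ' ' := by
  rw [PySem.Chars.endswith_iff]
  constructor
  · rintro ⟨t, ht⟩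
    have h2 : cs.getLast? = some ' ' := List.getLast?_eq_some_iff.mpr ⟨t, ht.symm⟩
    rw [List.getLast?_eq_some_getLast h] at h2
    exact Option.some.inj h2
  · intro hlast
    refine ⟨cs.dropLast, ?_⟩
    have := List.dropLast_append_getLast h
    rwa [hlast] at this

-- ===== VERDICT (by name: the statement is the Claim_ definition above) =====
theorem letters_in_words_spec : Claim_equal_letters_in_words := by
  intro s _ hpre
  unfold Spec_letters_in_words letters_in_words letters_in_words_alt
  have hcs : s.toList ≠ [] := fun h => hpre (String.toList_eq_nil_iff.mp h)
  have hlen : 0 < s.toList.length := List.length_pos_of_ne_nil hcs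
  rw [splitOn_eq_spaceChunks]
  have hK := spaceChunks_ne_nil ([] : List Char) s.toList
  rw [foldA_eq]
  have hget : PySem.Str.pyGet? s (PySem.Str.len s - 1) = some (s.toList.getLast hcs) := by
    have e : ((s.toList.length : Int) - 1) = ((s.toList.length - 1 : Nat) : Int) := by omega
    rw [PySem.Str.pyGet?_eq, PySem.Str.len_eq, PySem.Chars.pyGet?, e,
      PySem.List.pyGet?_natCast, List.getElem?_eq_getElem (by omega)]
    congr 1
    exact (List.getLast_eq_getElem hcs).symm
  rw [hget]
  simp only [PySem.Str.endswith_eq]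
  have hsp : (" " : String).toList = [' '] := rfl
  simp only [hsp]
  by_cases hlast : s.toList.getLast hcs = ' '
  · rw [if_pos ((endswith_space_iff _ hcs).mpr hlast)]
    simp [hlast, List.map_dropLast]
  · rw [if_neg (fun h => hlast ((endswith_space_iff _ hcs).mp h)), if_pos hlast]
    conv_rhs => rw [← List.dropLast_append_getLast hK]
    rw [List.getLastD_eq_getLast?, List.getLast?_eq_some_getLast hK]
    simp
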